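-- pv_equiv track=rewrite | github.com/NikitaKuzlyaev/hackit_5 | j.py | solve
-- ===== SOURCE A (Python) =====
-- def solve(p, b, tp, tb):
--     if p == 0 and b == 0:
--         return 0
--
--     left, right = 0, p * tp + b * tb
--
--     def can_finish(T):
--         max_p1 = min(p, T // tp) if tp > 0 else p
--         for p1 in range(0, max_p1 + 1):
--             time1 = p1 * tp
--             if time1 > T:
--                 break
--             b1 = min(b, (T - time1) // tb) if tb > 0 else b
--
--             p2 = p - p1
--             b2 = b - b1
--             if p2 < 0:
--                 p2 = 0
--             if b2 < 0:
--                 b2 = 0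
--
--             if p2 * tp + b2 * tb <= T:
--                 return True
--         return False
--
--     while left < right:
--         mid = (left + right) // 2
--         if can_finish(mid):
--             right = mid
--         else:
--             left = mid + 1
--
--     return left
-- ===== SOURCE B (Python) =====
-- def solve(p, b, tp, tb):
--     W = p * tp + b * tb
--     if W <= 0:
--         return 0
--     best = W
--     for p1 in range(p + 1):
--         a = p1 * tp
--         k = (W - 2 * a) // (2 * tb)
--         for c in (k, k + 1):
--             b1 = min(max(c, 0), b)
--             s = a + b1 * tb
--             best = min(best, max(s, W - s))
--     return best
-- ===== Notes on version B (the rewrite author's own statement) =====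
-- stated objective: alternative
-- what changed: Replaced A's binary search on the makespan (each probe scanning all p1 splits) by a direct scan that, for each p1, computes via floor division the two b1 counts whose load is closest to half the total work and takes the minimum of max(load, W-load).
-- outside the precondition, e.g. on solve(2, 2, 3, -2): A returns 2, B returns 1; on solve(8, -1, 5, -2): A returns 20, B returns 22; on solve(1, 3, 5, 0): A returns 5, B raises ZeroDivisionError
import Mathlib
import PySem

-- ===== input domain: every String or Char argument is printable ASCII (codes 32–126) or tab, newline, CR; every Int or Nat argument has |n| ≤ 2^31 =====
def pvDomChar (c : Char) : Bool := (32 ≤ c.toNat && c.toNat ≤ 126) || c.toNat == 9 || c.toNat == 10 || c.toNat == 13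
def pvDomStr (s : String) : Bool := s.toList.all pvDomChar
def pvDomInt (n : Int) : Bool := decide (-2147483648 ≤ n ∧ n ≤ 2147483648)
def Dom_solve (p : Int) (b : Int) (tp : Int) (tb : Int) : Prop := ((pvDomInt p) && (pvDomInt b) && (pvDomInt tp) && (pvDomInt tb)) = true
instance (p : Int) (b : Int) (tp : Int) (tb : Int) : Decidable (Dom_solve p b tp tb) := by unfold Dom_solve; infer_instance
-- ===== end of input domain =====

-- B replaces A's binary search over candidate makespans by a direct scan that, for each count p1
-- of type-p tasks on worker 1, places the two b1-counts whose load is closest to half the total work.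

-- ===== PORT A =====
def canFinishLoop (p b tp tb T : Int) : List Int → Bool
  | [] => false
  | p1 :: rest =>
    let time1 := p1 * tp
    if time1 > T then false   -- 'break' then 'return False'
    else
      let b1 := if tb > 0 then min b (PySem.Int.floordiv (T - time1) tb) else b
      let p2 := p - p1
      let b2 := b - b1
      let p2' := if p2 < 0 then 0 else p2
      let b2' := if b2 < 0 then 0 else b2
      if p2' * tp + b2' * tb ≤ T then true
      else canFinishLoop p b tp tb T rest

def canFinish (p b tp tb T : Int) : Bool :=
  let maxP1 := if tp > 0 then min p (PySem.Int.floordiv T tp) else p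
  canFinishLoop p b tp tb T (PySem.List.pyRange 0 (maxP1 + 1) 1)

def bsearch (p b tp tb left right : Int) : Int :=
  if h : left < right then
    let mid := PySem.Int.floordiv (left + right) 2
    if canFinish p b tp tb mid then bsearch p b tp tb left mid
    else bsearch p b tp tb (mid + 1) right
  else left
termination_by (right - left).toNat
decreasing_by
  · have h1 := (PySem.Int.le_floordiv_iff_mul_le (a := left + right) (b := 2) (q := left) (by omega)).2 (by omega)
    have h2 := (PySem.Int.floordiv_lt_iff_lt_mul (a := left + right) (b := 2) (q := right) (by omega)).2 (by omega)
    omega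
  · have h1 := (PySem.Int.le_floordiv_iff_mul_le (a := left + right) (b := 2) (q := left) (by omega)).2 (by omega)
    have h2 := (PySem.Int.floordiv_lt_iff_lt_mul (a := left + right) (b := 2) (q := right) (by omega)).2 (by omega)
    omega

def solve (p : Int) (b : Int) (tp : Int) (tb : Int) : Int :=
  if p = 0 ∧ b = 0 then 0
  else bsearch p b tp tb 0 (p * tp + b * tb)

-- ===== PORT B =====
def clampCand (b tb W a best c : Int) : Int :=
  let b1 := min (max c 0) b
  let s := a + b1 * tb
  min best (max s (W - s))

def altStep (b tp tb W best p1 : Int) : Int :=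
  let a := p1 * tp
  let k := PySem.Int.floordiv (W - 2 * a) (2 * tb)
  clampCand b tb W a (clampCand b tb W a best k) (k + 1)

def solve_alt (p : Int) (b : Int) (tp : Int) (tb : Int) : Int :=
  let W := p * tp + b * tb
  if W ≤ 0 then 0
  else (PySem.List.pyRange 0 (p + 1) 1).foldl (altStep b tp tb W) W

-- ===== PRECONDITION & SPEC =====
-- Pre_ admits every input with nonpositive total work (both return 0), every negative p (both
-- return the total work), and the whole half-space 0 ≤ b, 1 ≤ tb (which contains the task's
-- natural domain).  The excluded inputs (positive total work with b < 0 or tb ≤ 0) are ones where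
-- A still returns, but its binary search then bisects a non-monotone feasibility predicate, so
-- its value is an accident of the bisection (and with tb = 0 B divides by zero).
def Pre_solve (p : Int) (b : Int) (tp : Int) (tb : Int) : Prop :=
  p * tp + b * tb ≤ 0 ∨ p < 0 ∨ (0 ≤ b ∧ 1 ≤ tb)
instance (p : Int) (b : Int) (tp : Int) (tb : Int) : Decidable (Pre_solve p b tp tb) := by unfold Pre_solve; infer_instance
def pvWitness_solve : Int × Int × Int × Int := (2, 3, 3, 5)

def Spec_solve (p : Int) (b : Int) (tp : Int) (tb : Int) (out : Int) : Prop := out = solve_alt p b tp tb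
instance (p : Int) (b : Int) (tp : Int) (tb : Int) (out : Int) : Decidable (Spec_solve p b tp tb out) := by unfold Spec_solve; infer_instance

-- ===== CLAIM (what is proved, stated in full; the proofs are below) =====
def Claim_equal_solve : Prop := ∀ (p : Int) (b : Int) (tp : Int) (tb : Int), Dom_solve p b tp tb → Pre_solve p b tp tb → Spec_solve p b tp tb (solve p b tp tb)

-- ===== LEMMAS AND PROOFS =====

-- the feasibility predicate: some split of the tasks finishes both workers by time T
def Feas (p b tp tb T : Int) : Prop :=
  ∃ p1 b1, 0 ≤ p1 ∧ p1 ≤ p ∧ 0 ≤ b1 ∧ b1 ≤ b ∧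
    p1 * tp + b1 * tb ≤ T ∧ (p - p1) * tp + (b - b1) * tb ≤ T

lemma Feas_mono {p b tp tb T T' : Int} (h : Feas p b tp tb T) (hle : T ≤ T') :
    Feas p b tp tb T' := by
  obtain ⟨p1, b1, h1, h2, h3, h4, h5, h6⟩ := h
  exact ⟨p1, b1, h1, h2, h3, h4, le_trans h5 hle, le_trans h6 hle⟩

lemma loop_true_iff (p b tp tb T : Int) (hb : 0 ≤ b) (htb : 1 ≤ tb) :
    ∀ l : List Int, (∀ x ∈ l, x * tp ≤ T ∧ x ≤ p) →
    (canFinishLoop p b tp tb T l = true ↔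
      ∃ p1 ∈ l, (p - p1) * tp + (b - min b (PySem.Int.floordiv (T - p1 * tp) tb)) * tb ≤ T) := by
  intro l
  induction l with
  | nil => intro _; simp [canFinishLoop]
  | cons x rest ih =>
    intro hmem
    obtain ⟨hxT, hxp⟩ := hmem x List.mem_cons_self
    have htbpos : tb > 0 := by omega
    have hb2 : ¬ (b - min b (PySem.Int.floordiv (T - x * tp) tb) < 0) := by
      have := min_le_left b (PySem.Int.floordiv (T - x * tp) tb)
      omega
    have hp2 : ¬ (p - x < 0) := by omega
    rw [canFinishLoop]
    simp only [if_neg (by omega : ¬ x * tp > T), if_pos htbpos, if_neg hb2, if_neg hp2]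
    by_cases hs : (p - x) * tp + (b - min b (PySem.Int.floordiv (T - x * tp) tb)) * tb ≤ T
    · simp only [if_pos hs, true_iff]
      exact ⟨x, List.mem_cons_self, hs⟩
    · rw [if_neg hs, ih (fun y hy => hmem y (List.mem_cons_of_mem _ hy))]
      constructor
      · rintro ⟨p1, hp1, hcond⟩; exact ⟨p1, List.mem_cons_of_mem _ hp1, hcond⟩
      · rintro ⟨p1, hp1, hcond⟩
        rcases List.mem_cons.1 hp1 with rfl | hp1
        · exact absurd hcond hs
        · exact ⟨p1, hp1, hcond⟩

lemma canFinishRange_iff (p b tp tb T M : Int) (hb : 0 ≤ b) (htb : 1 ≤ tb) (hT : 0 ≤ T)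
    (hMp : M ≤ p) (hMT : ∀ x, 0 ≤ x → x ≤ M → x * tp ≤ T)
    (hMmax : ∀ p1 b1, 0 ≤ p1 → p1 ≤ p → 0 ≤ b1 → b1 ≤ b →
      p1 * tp + b1 * tb ≤ T → p1 ≤ M) :
    canFinishLoop p b tp tb T (PySem.List.pyRange 0 (M + 1) 1) = true ↔ Feas p b tp tb T := by
  have htb0 : (0:Int) < tb := by omega
  have hmem : ∀ x ∈ PySem.List.pyRange 0 (M + 1) 1, x * tp ≤ T ∧ x ≤ p := by
    intro x hx
    rw [PySem.List.mem_pyRange_one] at hx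
    exact ⟨hMT x hx.1 (by omega), by omega⟩
  rw [loop_true_iff p b tp tb T hb htb _ hmem]
  constructor
  · rintro ⟨p1, hp1, hcond⟩
    rw [PySem.List.mem_pyRange_one] at hp1
    have hT1 : p1 * tp ≤ T := hMT p1 hp1.1 (by omega)
    have hq0 : 0 ≤ PySem.Int.floordiv (T - p1 * tp) tb :=
      (PySem.Int.le_floordiv_iff_mul_le htb0).2 (by omega)
    refine ⟨p1, min b (PySem.Int.floordiv (T - p1 * tp) tb), hp1.1, by omega,
      le_min hb hq0, min_le_left _ _, ?_, hcond⟩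
    have hmul : min b (PySem.Int.floordiv (T - p1 * tp) tb) * tb ≤ T - p1 * tp :=
      (PySem.Int.le_floordiv_iff_mul_le htb0).1 (min_le_right _ _)
    omega
  · rintro ⟨p1, b1, h1, h2, h3, h4, h5, h6⟩
    have hp1M : p1 ≤ M := hMmax p1 b1 h1 h2 h3 h4 h5
    refine ⟨p1, ?_, ?_⟩
    · rw [PySem.List.mem_pyRange_one]; omega
    · have hb1' : b1 ≤ min b (PySem.Int.floordiv (T - p1 * tp) tb) :=
        le_min h4 ((PySem.Int.le_floordiv_iff_mul_le htb0).2 (by omega))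
      have := mul_le_mul_of_nonneg_right
        (sub_le_sub_left hb1' b) (by omega : (0:Int) ≤ tb)
      omega

lemma canFinish_iff (p b tp tb T : Int) (hp : 0 ≤ p) (hb : 0 ≤ b)
    (htb : 1 ≤ tb) (hT : 0 ≤ T) :
    canFinish p b tp tb T = true ↔ Feas p b tp tb T := by
  by_cases htp0 : tp > 0
  · simp only [canFinish, if_pos htp0]
    refine canFinishRange_iff p b tp tb T _ hb htb hT (min_le_left _ _) ?_ ?_
    · intro x hx0 hxM
      have hxf : x ≤ PySem.Int.floordiv T tp := by
        have := min_le_right p (PySem.Int.floordiv T tp); omega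
      exact (PySem.Int.le_floordiv_iff_mul_le htp0).1 hxf
    · intro p1 b1 h1 h2 h3 h4 h5
      have hbt : 0 ≤ b1 * tb := mul_nonneg h3 (by omega)
      have hp1f : p1 ≤ PySem.Int.floordiv T tp :=
        (PySem.Int.le_floordiv_iff_mul_le htp0).2 (by omega)
      exact le_min h2 hp1f
  · simp only [canFinish, if_neg htp0]
    refine canFinishRange_iff p b tp tb T p hb htb hT (le_refl p) ?_ ?_
    · intro x hx0 _
      have := mul_nonpos_of_nonneg_of_nonpos hx0 (by omega : tp ≤ 0)
      omega
    · intro p1 b1 _ h2 _ _ _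
      exact h2

lemma bsearch_char (p b tp tb : Int) (hp : 0 ≤ p) (hb : 0 ≤ b) (htb : 1 ≤ tb) :
    ∀ n left right, (right - left).toNat = n → 0 ≤ left → left ≤ right →
      Feas p b tp tb right → (∀ t, 0 ≤ t → t < left → ¬ Feas p b tp tb t) →
      (left ≤ bsearch p b tp tb left right ∧ Feas p b tp tb (bsearch p b tp tb left right) ∧
        ∀ t, 0 ≤ t → t < bsearch p b tp tb left right → ¬ Feas p b tp tb t) := by
  intro n
  induction n using Nat.strong_induction_on with
  | _ n ih =>
    intro left right hn hl hlr hFr hnl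
    rw [bsearch]
    by_cases h : left < right
    · rw [dif_pos h]
      obtain ⟨hmidl, hmidr⟩ := PySem.Int.floordiv_two_mid_bounds hlr
      have hmidlt : PySem.Int.floordiv (left + right) 2 < right :=
        (PySem.Int.floordiv_lt_iff_lt_mul (by omega)).2 (by omega)
      by_cases hc : canFinish p b tp tb (PySem.Int.floordiv (left + right) 2) = true
      · rw [if_pos hc]
        have hFm := (canFinish_iff p b tp tb _ hp hb htb (by omega)).1 hc
        exact ih ((PySem.Int.floordiv (left + right) 2 - left).toNat) (by omega)
          left _ rfl hl (by omega) hFm hnl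
      · rw [if_neg hc]
        have hnFm : ¬ Feas p b tp tb (PySem.Int.floordiv (left + right) 2) := fun hF =>
          hc ((canFinish_iff p b tp tb _ hp hb htb (by omega)).2 hF)
        have hnl' : ∀ t, 0 ≤ t → t < PySem.Int.floordiv (left + right) 2 + 1 →
            ¬ Feas p b tp tb t := by
          intro t ht hlt hF
          rcases lt_or_ge t left with h' | h'
          · exact hnl t ht h' hF
          · exact hnFm (Feas_mono hF (by omega))
        obtain ⟨r1, r2, r3⟩ := ih ((right - (PySem.Int.floordiv (left + right) 2 + 1)).toNat)
          (by omega) (PySem.Int.floordiv (left + right) 2 + 1) right rfl (by omega)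
          (by omega) hFr hnl'
        exact ⟨by omega, r2, r3⟩
    · rw [dif_neg h]
      have : left = right := by omega
      subst this
      exact ⟨le_refl _, hFr, hnl⟩

-- the two-sided load of a split
def gload (tp tb W p1 b1 : Int) : Int :=
  max (p1 * tp + b1 * tb) (W - (p1 * tp + b1 * tb))

lemma Feas_iff_g (p b tp tb T : Int) :
    Feas p b tp tb T ↔
      ∃ p1 b1, 0 ≤ p1 ∧ p1 ≤ p ∧ 0 ≤ b1 ∧ b1 ≤ b ∧ gload tp tb (p * tp + b * tb) p1 b1 ≤ T := by
  have key : ∀ p1 b1 : Int, (p - p1) * tp + (b - b1) * tb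
      = (p * tp + b * tb) - (p1 * tp + b1 * tb) := by intro p1 b1; ring
  constructor
  · rintro ⟨p1, b1, h1, h2, h3, h4, h5, h6⟩
    refine ⟨p1, b1, h1, h2, h3, h4, ?_⟩
    rw [gload, max_le_iff]
    have := key p1 b1
    exact ⟨h5, by omega⟩
  · rintro ⟨p1, b1, h1, h2, h3, h4, h5⟩
    rw [gload, max_le_iff] at h5
    have := key p1 b1
    exact ⟨p1, b1, h1, h2, h3, h4, h5.1, by omega⟩

lemma gload_nonneg {tp tb W p1 b1 : Int} (hW : 0 ≤ W) : 0 ≤ gload tp tb W p1 b1 := by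
  rw [gload]
  rcases le_total (p1 * tp + b1 * tb) (W - (p1 * tp + b1 * tb)) with h | h
  · rw [max_eq_right h]; omega
  · rw [max_eq_left h]; omega

lemma clampCand_eq_gload (b tb W best c tp p1 : Int) :
    clampCand b tb W (p1 * tp) best c
      = min best (gload tp tb W p1 (min (max c 0) b)) := by
  simp only [clampCand, gload]

-- V-shape: the two clamped candidates dominate every admissible b1 for this p1
lemma altStep_le (b tp tb W best p1 : Int) (hb : 0 ≤ b) (htb : 1 ≤ tb) :
    ∀ b1, 0 ≤ b1 → b1 ≤ b → altStep b tp tb W best p1 ≤ gload tp tb W p1 b1 := by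
  intro b1 hb1 hb1b
  rw [altStep, clampCand_eq_gload, clampCand_eq_gload]
  set a := p1 * tp with ha
  set k := PySem.Int.floordiv (W - 2 * a) (2 * tb) with hk
  have h2tb : (0:Int) < 2 * tb := by omega
  have hklo : k * (2 * tb) ≤ W - 2 * a :=
    (PySem.Int.le_floordiv_iff_mul_le h2tb).1 (le_refl k)
  have hkhi : W - 2 * a < (k + 1) * (2 * tb) :=
    (PySem.Int.floordiv_lt_iff_lt_mul h2tb).1 (by omega)
  have e1 : k * (2 * tb) = 2 * (k * tb) := by ring
  have e2 : (k + 1) * (2 * tb) = 2 * ((k + 1) * tb) := by ring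
  have hgb : gload tp tb W p1 b1 = max (a + b1 * tb) (W - (a + b1 * tb)) := by
    rw [gload]
  rcases le_or_gt b1 k with hcase | hcase
  · -- b1 ≤ k : the candidate min (max k 0) b dominates b1
    have hmax : max k 0 = k := max_eq_left (by omega)
    set c1 := min (max k 0) b with hc1
    have hc1k : c1 ≤ k := by rw [hc1, hmax]; exact min_le_left _ _
    have hb1c1 : b1 ≤ c1 := by rw [hc1, hmax]; exact le_min hcase hb1b
    have hm1 : c1 * tb ≤ k * tb := mul_le_mul_of_nonneg_right hc1k (by omega)
    have hm2 : b1 * tb ≤ c1 * tb := mul_le_mul_of_nonneg_right hb1c1 (by omega)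
    have hg1 : gload tp tb W p1 c1 = W - (a + c1 * tb) := by
      rw [gload]; exact max_eq_right (by omega)
    have hle : min (min best (gload tp tb W p1 c1))
        (gload tp tb W p1 (min (max (k + 1) 0) b)) ≤ gload tp tb W p1 c1 :=
      le_trans (min_le_left _ _) (min_le_right _ _)
    have hrb : W - (a + b1 * tb) ≤ gload tp tb W p1 b1 := by
      rw [hgb]; exact le_max_right _ _
    omega
  · -- k + 1 ≤ b1 : the candidate min (max (k+1) 0) b dominates b1
    set c2 := min (max (k + 1) 0) b with hc2
    have hc2ge : k + 1 ≤ c2 := le_min (le_max_left _ _) (by omega)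
    have hc2le : c2 ≤ b1 := le_trans (min_le_left _ _) (max_le (by omega) hb1)
    have hm1 : (k + 1) * tb ≤ c2 * tb := mul_le_mul_of_nonneg_right hc2ge (by omega)
    have hm2 : c2 * tb ≤ b1 * tb := mul_le_mul_of_nonneg_right hc2le (by omega)
    have hg2 : gload tp tb W p1 c2 = a + c2 * tb := by
      rw [gload]; exact max_eq_left (by omega)
    have hle : min (min best (gload tp tb W p1 (min (max k 0) b)))
        (gload tp tb W p1 c2) ≤ gload tp tb W p1 c2 := min_le_right _ _
    have hrb : a + b1 * tb ≤ gload tp tb W p1 b1 := by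
      rw [hgb]; exact le_max_left _ _
    omega

lemma altStep_le_self (b tp tb W best p1 : Int) : altStep b tp tb W best p1 ≤ best := by
  simp only [altStep, clampCand]
  exact le_trans (min_le_left _ _) (min_le_left _ _)

lemma altStep_cases (b tp tb W best p1 : Int) (hb : 0 ≤ b) :
    altStep b tp tb W best p1 = best ∨
      ∃ b1, 0 ≤ b1 ∧ b1 ≤ b ∧ altStep b tp tb W best p1 = gload tp tb W p1 b1 := by
  have hcl : ∀ c : Int, 0 ≤ min (max c 0) b ∧ min (max c 0) b ≤ b := by
    intro c; exact ⟨le_min (le_max_right _ _) hb, min_le_right _ _⟩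
  rw [altStep]
  rw [clampCand_eq_gload, clampCand_eq_gload]
  set k := PySem.Int.floordiv (W - 2 * (p1 * tp)) (2 * tb) with hk
  rcases min_cases (min best (gload tp tb W p1 (min (max k 0) b)))
      (gload tp tb W p1 (min (max (k + 1) 0) b)) with ⟨he, _⟩ | ⟨he, _⟩
  · rw [he]
    rcases min_cases best (gload tp tb W p1 (min (max k 0) b)) with ⟨he2, _⟩ | ⟨he2, _⟩
    · rw [he2]; left; rfl
    · rw [he2]; right; exact ⟨_, (hcl k).1, (hcl k).2, rfl⟩
  · rw [he]; right; exact ⟨_, (hcl (k + 1)).1, (hcl (k + 1)).2, rfl⟩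

lemma foldl_attained (p b tp tb W : Int) (hb : 0 ≤ b) :
    ∀ (l : List Int) (acc : Int), (∀ x ∈ l, 0 ≤ x ∧ x ≤ p) →
      (∃ p1 b1, 0 ≤ p1 ∧ p1 ≤ p ∧ 0 ≤ b1 ∧ b1 ≤ b ∧ gload tp tb W p1 b1 ≤ acc) →
      ∃ p1 b1, 0 ≤ p1 ∧ p1 ≤ p ∧ 0 ≤ b1 ∧ b1 ≤ b ∧
        gload tp tb W p1 b1 ≤ l.foldl (altStep b tp tb W) acc := by
  intro l
  induction l with
  | nil => intro acc _ h; simpa using h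
  | cons x rest ih =>
    intro acc hmem hacc
    rw [List.foldl_cons]
    apply ih _ (fun y hy => hmem y (List.mem_cons_of_mem _ hy))
    rcases altStep_cases b tp tb W acc x hb with he | ⟨b1, hb1, hb1b, he⟩
    · rw [he]; exact hacc
    · rw [he]
      exact ⟨x, b1, (hmem x (List.mem_cons_self)).1, (hmem x (List.mem_cons_self)).2,
        hb1, hb1b, le_refl _⟩

lemma foldl_lower (p b tp tb W : Int) (hb : 0 ≤ b) (htb : 1 ≤ tb) :
    ∀ (l : List Int) (acc : Int),
      l.foldl (altStep b tp tb W) acc ≤ acc ∧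
      ∀ p1 ∈ l, ∀ b1, 0 ≤ b1 → b1 ≤ b →
        l.foldl (altStep b tp tb W) acc ≤ gload tp tb W p1 b1 := by
  intro l
  induction l with
  | nil => intro acc; exact ⟨le_refl _, by simp⟩
  | cons x rest ih =>
    intro acc
    rw [List.foldl_cons]
    obtain ⟨ihle, ihall⟩ := ih (altStep b tp tb W acc x)
    refine ⟨le_trans ihle (altStep_le_self _ _ _ _ _ _), ?_⟩
    intro p1 hp1 b1 hb1 hb1b
    rcases List.mem_cons.1 hp1 with rfl | hp1
    · exact le_trans ihle (altStep_le b tp tb W acc p1 hb htb b1 hb1 hb1b)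
    · exact ihall p1 hp1 b1 hb1 hb1b

lemma alt_char (p b tp tb : Int) (hp : 0 ≤ p) (hb : 0 ≤ b) (htb : 1 ≤ tb)
    (hWpos : 0 < p * tp + b * tb) :
    0 ≤ solve_alt p b tp tb ∧ Feas p b tp tb (solve_alt p b tp tb) ∧
      ∀ t, 0 ≤ t → t < solve_alt p b tp tb → ¬ Feas p b tp tb t := by
  have hW : 0 ≤ p * tp + b * tb := le_of_lt hWpos
  have hsa : solve_alt p b tp tb
      = (PySem.List.pyRange 0 (p + 1) 1).foldl (altStep b tp tb (p * tp + b * tb))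
          (p * tp + b * tb) := by
    simp only [solve_alt, if_neg (by omega : ¬ p * tp + b * tb ≤ 0)]
  have hmem : ∀ x ∈ PySem.List.pyRange 0 (p + 1) 1, 0 ≤ x ∧ x ≤ p := by
    intro x hx; rw [PySem.List.mem_pyRange_one] at hx; omega
  have hinit : ∃ p1 b1, 0 ≤ p1 ∧ p1 ≤ p ∧ 0 ≤ b1 ∧ b1 ≤ b ∧
      gload tp tb (p * tp + b * tb) p1 b1 ≤ p * tp + b * tb := by
    refine ⟨0, 0, le_refl _, hp, le_refl _, hb, ?_⟩
    rw [gload, show (0:Int) * tp + 0 * tb = 0 by ring, sub_zero]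
    exact max_le hW (le_refl _)
  obtain ⟨p1, b1, h1, h2, h3, h4, h5⟩ :=
    foldl_attained p b tp tb (p * tp + b * tb) hb _ (p * tp + b * tb) hmem hinit
  obtain ⟨hle, hall⟩ :=
    foldl_lower p b tp tb (p * tp + b * tb) hb htb (PySem.List.pyRange 0 (p + 1) 1)
      (p * tp + b * tb)
  rw [hsa]
  refine ⟨le_trans (gload_nonneg hW) h5,
    (Feas_iff_g p b tp tb _).2 ⟨p1, b1, h1, h2, h3, h4, h5⟩, ?_⟩
  intro t ht hlt hF
  obtain ⟨q1, q2, g1, g2, g3, g4, g5⟩ := (Feas_iff_g p b tp tb t).1 hF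
  have := hall q1 (by rw [PySem.List.mem_pyRange_one]; omega) q2 g3 g4
  omega

lemma agree_nonpos (p b tp tb : Int) (hW : p * tp + b * tb ≤ 0) :
    solve p b tp tb = solve_alt p b tp tb := by
  have halt : solve_alt p b tp tb = 0 := by
    simp only [solve_alt, if_pos hW]
  rw [halt, solve]
  by_cases hz : p = 0 ∧ b = 0
  · rw [if_pos hz]
  · rw [if_neg hz, bsearch, dif_neg (by omega : ¬ (0:Int) < p * tp + b * tb)]

lemma canFinish_of_pneg (p b tp tb T : Int) (hp : p < 0) :
    canFinish p b tp tb T = false := by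
  have hM : (if tp > 0 then min p (PySem.Int.floordiv T tp) else p) + 1 ≤ 0 := by
    split
    · have := min_le_left p (PySem.Int.floordiv T tp); omega
    · omega
  simp only [canFinish]
  rw [PySem.List.pyRange_one_eq_nil (by omega)]
  rfl

lemma bsearch_of_pneg (p b tp tb : Int) (hp : p < 0) :
    ∀ n l r, (r - l).toNat = n → l ≤ r → bsearch p b tp tb l r = r := by
  intro n
  induction n using Nat.strong_induction_on with
  | _ n ih =>
    intro l r hn hlr
    rw [bsearch]
    by_cases h : l < r
    · rw [dif_pos h]
      obtain ⟨hmidl, hmidr⟩ := PySem.Int.floordiv_two_mid_bounds hlr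
      have hmidlt : PySem.Int.floordiv (l + r) 2 < r :=
        (PySem.Int.floordiv_lt_iff_lt_mul (by omega)).2 (by omega)
      rw [if_neg (by rw [canFinish_of_pneg p b tp tb _ hp]; simp)]
      exact ih ((r - (PySem.Int.floordiv (l + r) 2 + 1)).toNat) (by omega) _ r rfl (by omega)
    · rw [dif_neg h]; omega

lemma agree_pneg (p b tp tb : Int) (hp : p < 0) (hW : 0 < p * tp + b * tb) :
    solve p b tp tb = solve_alt p b tp tb := by
  have hz : ¬ (p = 0 ∧ b = 0) := by rintro ⟨rfl, _⟩; omega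
  rw [solve, if_neg hz, bsearch_of_pneg p b tp tb hp _ 0 (p * tp + b * tb) rfl (by omega)]
  rw [solve_alt]
  simp only [if_neg (by omega : ¬ p * tp + b * tb ≤ 0)]
  rw [PySem.List.pyRange_one_eq_nil (by omega)]
  rfl

-- ===== VERDICT (by name: the statement is the Claim_ definition above) =====
theorem solve_spec : Claim_equal_solve := by
  intro p b tp tb _ hpre
  unfold Spec_solve
  by_cases hW0 : p * tp + b * tb ≤ 0
  · exact agree_nonpos p b tp tb hW0
  · by_cases hpneg : p < 0
    · exact agree_pneg p b tp tb hpneg (by omega)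
    · obtain ⟨hp, hb, htb⟩ : 0 ≤ p ∧ 0 ≤ b ∧ 1 ≤ tb := by
        rcases hpre with h | h | h
        · exact absurd h hW0
        · exact absurd h hpneg
        · exact ⟨by omega, h.1, h.2⟩
      have hW : 0 ≤ p * tp + b * tb := by omega
      have hFW : Feas p b tp tb (p * tp + b * tb) :=
        ⟨p, b, hp, le_refl _, hb, le_refl _, le_refl _, by simpa using hW⟩
      have hA := bsearch_char p b tp tb hp hb htb _ 0 (p * tp + b * tb) rfl (le_refl 0) hW hFW
        (by intro t ht hlt; omega)
      have hB := alt_char p b tp tb hp hb htb (by omega)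
      have hz : ¬ (p = 0 ∧ b = 0) := by rintro ⟨rfl, rfl⟩; simp at hW0
      have hsolve : solve p b tp tb = bsearch p b tp tb 0 (p * tp + b * tb) := by
        simp [solve, hz]
      rw [hsolve]
      obtain ⟨hA0, hAF, hAmin⟩ := hA
      obtain ⟨hB0, hBF, hBmin⟩ := hB
      rcases lt_trichotomy (bsearch p b tp tb 0 (p * tp + b * tb)) (solve_alt p b tp tb) with h | h | h
      · exact absurd hAF (hBmin _ hA0 h)
      · exact h
      · exact absurd hBF (hAmin _ hB0 h)
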